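-- pv_equiv track=rewrite | github.com/Chong-source/Calendar_Automation_Project | Python_Version_Files/calendar_building_blocks.py | create_period_block_names
-- ===== SOURCE A (Python) =====
-- def create_period_block_names(letters_for_period_names, periods_per_rotation,
--                               classes_to_schedule):
--     """Takes a string of letters to use to create the period block names.
--     Returns a list of period block names."""
--     period_block_names = []
--     number = 1
--     for i in range(periods_per_rotation):
--         period_letter_prefix = letters_for_period_names[i % classes_to_schedule]
--         if not period_block_names:
--             period_block_names.append(f"{period_letter_prefix}{number}")
--         elif period_letter_prefix == letters_for_period_names[0]:
--             number += 1
--             period_block_names.append(f"{period_letter_prefix}{number}")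
--         else:
--             period_block_names.append(f"{period_letter_prefix}{number}")
--     return period_block_names
-- ===== SOURCE B (Python) =====
-- def create_period_block_names(letters_for_period_names, periods_per_rotation,
--                               classes_to_schedule):
--     """Segment construction: find the cut indices where the number advances,
--     then emit each constant-numbered segment wholesale (no running counter)."""
--     cuts = [i for i in range(1, periods_per_rotation)
--             if letters_for_period_names[i % classes_to_schedule]
--                == letters_for_period_names[0]]
--     bounds = [0] + cuts + [periods_per_rotation]
--     return [f"{letters_for_period_names[i % classes_to_schedule]}{num}"
--             for num, (lo, hi) in enumerate(zip(bounds, bounds[1:]), 1)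
--             for i in range(lo, hi)]
-- ===== Notes on version B (the rewrite author's own statement) =====
-- stated objective: alternative
-- what changed: Instead of threading a mutable counter through one element-by-element loop, B first locates the cut indices where the number advances, forms segment boundaries, and emits each constant-numbered segment wholesale (a group-by-segments construction).
import Mathlib
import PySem

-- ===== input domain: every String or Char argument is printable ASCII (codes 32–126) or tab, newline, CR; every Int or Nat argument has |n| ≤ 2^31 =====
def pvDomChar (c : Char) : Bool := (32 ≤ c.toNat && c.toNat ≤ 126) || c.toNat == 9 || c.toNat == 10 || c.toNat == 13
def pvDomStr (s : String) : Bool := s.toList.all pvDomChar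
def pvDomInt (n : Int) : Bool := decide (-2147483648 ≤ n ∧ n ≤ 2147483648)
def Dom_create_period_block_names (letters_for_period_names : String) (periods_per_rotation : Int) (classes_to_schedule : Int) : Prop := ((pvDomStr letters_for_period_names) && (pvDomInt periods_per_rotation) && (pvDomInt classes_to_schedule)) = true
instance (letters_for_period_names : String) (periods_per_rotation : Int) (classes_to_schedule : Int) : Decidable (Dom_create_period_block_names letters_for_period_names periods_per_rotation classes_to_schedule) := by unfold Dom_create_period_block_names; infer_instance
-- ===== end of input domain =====

-- B replaces A's counter-threading loop by a segment construction: find the cut indices where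
-- the number advances, then emit each constant-numbered segment wholesale (alternative decomposition, same cost).

-- f"{p}{n}" for a 1-char prefix p and an int n (shared formatting helper)
def pvMk (p : Char) (n : Int) : String := String.mk (p :: PySem.Int.toChars n)

-- ===== PORT A =====
def create_period_block_names (letters_for_period_names : String) (periods_per_rotation : Int) (classes_to_schedule : Int) : List String :=
  ((PySem.List.pyRange 0 periods_per_rotation 1).foldl
    (fun (st : List String × Int) i =>
      let p := (PySem.Str.pyGet? letters_for_period_names (PySem.Int.mod i classes_to_schedule)).getD ' '
      if st.1 = [] then (st.1 ++ [pvMk p st.2], st.2)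
      else if p = (PySem.Str.pyGet? letters_for_period_names 0).getD ' ' then
        (st.1 ++ [pvMk p (st.2 + 1)], st.2 + 1)
      else (st.1 ++ [pvMk p st.2], st.2))
    ([], 1)).1

-- ===== PORT B =====
def create_period_block_names_alt (letters_for_period_names : String) (periods_per_rotation : Int) (classes_to_schedule : Int) : List String :=
  let cuts := (PySem.List.pyRange 1 periods_per_rotation 1).filter
    (fun i => decide ((PySem.Str.pyGet? letters_for_period_names (PySem.Int.mod i classes_to_schedule)).getD ' '
      = (PySem.Str.pyGet? letters_for_period_names 0).getD ' '))
  let bounds := 0 :: cuts ++ [periods_per_rotation]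
  (PySem.List.enumerate (bounds.zip (PySem.List.slice bounds (some 1) none)) 1).flatMap
    (fun q => (PySem.List.pyRange q.2.1 q.2.2 1).map
      (fun i => pvMk ((PySem.Str.pyGet? letters_for_period_names (PySem.Int.mod i classes_to_schedule)).getD ' ') q.1))

-- ===== PRECONDITION & SPEC =====
-- Pre_ = exactly the inputs where Python A returns (otherwise it raises ZeroDivisionError or IndexError):
-- empty range, or a nonzero divisor with every used index (including Python's negative-divisor remainders) inside the string.
def Pre_create_period_block_names (letters_for_period_names : String) (periods_per_rotation : Int) (classes_to_schedule : Int) : Prop :=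
  periods_per_rotation ≤ 0 ∨
    (classes_to_schedule ≠ 0 ∧ 1 ≤ PySem.Str.len letters_for_period_names ∧
      (0 < classes_to_schedule → min periods_per_rotation classes_to_schedule ≤ PySem.Str.len letters_for_period_names) ∧
      ((classes_to_schedule ≤ -2 ∧ 2 ≤ periods_per_rotation) → -classes_to_schedule - 1 ≤ PySem.Str.len letters_for_period_names))
instance (letters_for_period_names : String) (periods_per_rotation : Int) (classes_to_schedule : Int) : Decidable (Pre_create_period_block_names letters_for_period_names periods_per_rotation classes_to_schedule) := by unfold Pre_create_period_block_names; infer_instance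

def pvWitness_create_period_block_names : String × Int × Int := ("abc", 7, 3)

def Spec_create_period_block_names (letters_for_period_names : String) (periods_per_rotation : Int) (classes_to_schedule : Int) (out : List String) : Prop := out = create_period_block_names_alt letters_for_period_names periods_per_rotation classes_to_schedule
instance (letters_for_period_names : String) (periods_per_rotation : Int) (classes_to_schedule : Int) (out : List String) : Decidable (Spec_create_period_block_names letters_for_period_names periods_per_rotation classes_to_schedule out) := by unfold Spec_create_period_block_names; infer_instance

-- ===== CLAIM (what is proved, stated in full; the proofs are below) =====
def Claim_equal_create_period_block_names : Prop := ∀ (letters_for_period_names : String) (periods_per_rotation : Int) (classes_to_schedule : Int), Dom_create_period_block_names letters_for_period_names periods_per_rotation classes_to_schedule → Pre_create_period_block_names letters_for_period_names periods_per_rotation classes_to_schedule → Spec_create_period_block_names letters_for_period_names periods_per_rotation classes_to_schedule (create_period_block_names letters_for_period_names periods_per_rotation classes_to_schedule)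

-- ===== LEMMAS AND PROOFS =====

-- A's loop step over an already-computed prefix character
def pvStepA (c0 : Char) (st : List String × Int) (p : Char) : List String × Int :=
  if st.1 = [] then (st.1 ++ [pvMk p st.2], st.2)
  else if p = c0 then (st.1 ++ [pvMk p (st.2 + 1)], st.2 + 1)
  else (st.1 ++ [pvMk p st.2], st.2)

-- the tail of A's output after the first element, as a structural recursion
def pvNumTail (c0 : Char) (num : Int) : List Char → List String
  | [] => []
  | p :: r => if p = c0 then pvMk p (num + 1) :: pvNumTail c0 (num + 1) r
              else pvMk p num :: pvNumTail c0 num r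

-- B's segment construction as a structural recursion over the boundary list
def pvFlatSeg (f : Int → Char) : Int → List Int → List String
  | num, b0 :: b1 :: rest =>
      (PySem.List.pyRange b0 b1 1).map (fun i => pvMk (f i) num) ++ pvFlatSeg f (num + 1) (b1 :: rest)
  | _, _ => []

theorem pvFoldA (c0 : Char) : ∀ (ps : List Char) (acc : List String) (num : Int), acc ≠ [] →
    (ps.foldl (pvStepA c0) (acc, num)).1 = acc ++ pvNumTail c0 num ps := by
  intro ps
  induction ps with
  | nil => intro acc num _; simp [pvNumTail]
  | cons p r ih =>
    intro acc num hacc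
    by_cases hp : p = c0
    · simp only [List.foldl_cons, pvStepA, if_neg hacc, if_pos hp, pvNumTail]
      rw [ih (acc ++ [pvMk p (num + 1)]) (num + 1) (by simp)]
      simp [hp]
    · simp only [List.foldl_cons, pvStepA, if_neg hacc, if_neg hp, pvNumTail]
      rw [ih (acc ++ [pvMk p num]) num (by simp)]
      simp

-- B's flatMap-over-enumerated-boundary-pairs equals pvFlatSeg
theorem pvFlatEq (f : Int → Char) : ∀ (bounds : List Int) (num : Int),
    ((PySem.List.enumerate (bounds.zip (PySem.List.slice bounds (some 1) none)) num).flatMap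
      (fun q => (PySem.List.pyRange q.2.1 q.2.2 1).map (fun i => pvMk (f i) q.1)))
      = pvFlatSeg f num bounds := by
  intro bounds
  induction bounds with
  | nil => intro num; simp [pvFlatSeg, PySem.List.slice_from_one, PySem.List.enumerate_nil]
  | cons b0 rest ih =>
    intro num
    cases rest with
    | nil => simp [pvFlatSeg, PySem.List.slice_from_one, PySem.List.enumerate_nil]
    | cons b1 r =>
      rw [PySem.List.slice_from_one]
      simp only [List.tail_cons, List.zip_cons_cons, PySem.List.enumerate_cons, List.flatMap_cons]
      have h2 := ih (num + 1)
      rw [PySem.List.slice_from_one] at h2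
      simp only [List.tail_cons] at h2
      rw [h2]
      simp [pvFlatSeg]

-- peel one index off the head segment
theorem pvPeel (f : Int → Char) (num a : Int) (rest : List Int)
    (hne : rest ≠ []) (hlt : ∀ x ∈ rest, a < x) :
    pvFlatSeg f num (a :: rest) = pvMk (f a) num :: pvFlatSeg f num ((a + 1) :: rest) := by
  cases rest with
  | nil => exact absurd rfl hne
  | cons c r =>
    have hac : a < c := hlt c (by simp)
    simp only [pvFlatSeg]
    rw [PySem.List.pyRange_one_cons hac]
    simp

-- main segment lemma: B's segments from boundary a onward equal A's counter tail
theorem pvSegMain (f : Int → Char) (c0 : Char) (n : Int) :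
    ∀ (k : Nat) (a num : Int), (n - a).toNat = k →
    pvFlatSeg f num (a :: ((PySem.List.pyRange a n 1).filter (fun i => decide (f i = c0)) ++ [n]))
      = pvNumTail c0 num ((PySem.List.pyRange a n 1).map f) := by
  intro k
  induction k using Nat.strong_induction_on with
  | _ k ih =>
    intro a num hk
    by_cases h : n ≤ a
    · rw [PySem.List.pyRange_one_eq_nil h]
      simp [pvFlatSeg, pvNumTail, PySem.List.pyRange_one_eq_nil h]
    · push_neg at h
      rw [PySem.List.pyRange_one_cons h]
      simp only [List.filter_cons, List.map_cons]
      have hrest : ∀ x ∈ (PySem.List.pyRange (a+1) n 1).filter (fun i => decide (f i = c0)) ++ [n], a < x := by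
        intro x hx
        rcases List.mem_append.mp hx with hx | hx
        · have hm := (List.mem_filter.mp hx).1
          have := (PySem.List.mem_pyRange_one.mp hm).1
          omega
        · simp only [List.mem_singleton] at hx; omega
      have hne : (PySem.List.pyRange (a+1) n 1).filter (fun i => decide (f i = c0)) ++ [n] ≠ [] := by simp
      have hkk : (n - (a + 1)).toNat < k := by omega
      by_cases hfa : f a = c0
      · simp only [hfa, decide_true, if_true, List.cons_append]
        have : pvFlatSeg f num (a :: a ::
            ((PySem.List.pyRange (a+1) n 1).filter (fun i => decide (f i = c0)) ++ [n]))
            = pvFlatSeg f (num + 1) (a ::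
              ((PySem.List.pyRange (a+1) n 1).filter (fun i => decide (f i = c0)) ++ [n])) := by
          simp [pvFlatSeg, PySem.List.pyRange_one_eq_nil (le_refl a)]
        rw [this, pvPeel f (num + 1) a _ hne hrest,
          ih ((n - (a + 1)).toNat) hkk (a + 1) (num + 1) rfl]
        simp [pvNumTail, hfa]
      · simp only [hfa, decide_false, Bool.false_eq_true, if_false]
        rw [pvPeel f num a _ hne hrest, ih ((n - (a + 1)).toNat) hkk (a + 1) num rfl]
        simp [pvNumTail, hfa]

theorem pvEq (letters_for_period_names : String) (periods_per_rotation : Int) (classes_to_schedule : Int) :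
    create_period_block_names letters_for_period_names periods_per_rotation classes_to_schedule
      = create_period_block_names_alt letters_for_period_names periods_per_rotation classes_to_schedule := by
  unfold create_period_block_names create_period_block_names_alt
  set c0 : Char := (PySem.Str.pyGet? letters_for_period_names 0).getD ' ' with hc0
  set f : Int → Char := fun i => (PySem.Str.pyGet? letters_for_period_names (PySem.Int.mod i classes_to_schedule)).getD ' ' with hf
  rw [show (fun (st : List String × Int) i =>
        (if st.1 = [] then (st.1 ++ [pvMk (f i) st.2], st.2)
         else if f i = c0 then (st.1 ++ [pvMk (f i) (st.2 + 1)], st.2 + 1)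
         else (st.1 ++ [pvMk (f i) st.2], st.2)))
      = (fun st i => pvStepA c0 st (f i)) from rfl]
  rw [← List.foldl_map, pvFlatEq f]
  by_cases hn : periods_per_rotation ≤ 0
  · rw [PySem.List.pyRange_one_eq_nil hn, PySem.List.pyRange_one_eq_nil (by omega : periods_per_rotation ≤ 1)]
    simp [pvFlatSeg, PySem.List.pyRange_one_eq_nil hn]
  · push_neg at hn
    rw [PySem.List.pyRange_one_cons hn]
    simp only [List.map_cons, List.foldl_cons, pvStepA, if_true, List.nil_append]
    rw [pvFoldA c0 _ [pvMk (f 0) 1] 1 (by simp)]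
    have hrest : ∀ x ∈ (PySem.List.pyRange 1 periods_per_rotation 1).filter (fun i => decide (f i = c0)) ++ [periods_per_rotation], (0 : Int) < x := by
      intro x hx
      rcases List.mem_append.mp hx with hx | hx
      · have hm := (List.mem_filter.mp hx).1
        have := (PySem.List.mem_pyRange_one.mp hm).1
        omega
      · simp only [List.mem_singleton] at hx; omega
    rw [show ((0 : Int) :: (PySem.List.pyRange 1 periods_per_rotation 1).filter (fun i => decide (f i = c0)) ++ [periods_per_rotation])
        = (0 : Int) :: ((PySem.List.pyRange 1 periods_per_rotation 1).filter (fun i => decide (f i = c0)) ++ [periods_per_rotation]) from rfl]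
    rw [pvPeel f 1 0 _ (by simp) hrest]
    rw [show (0 : Int) + 1 = 1 from rfl]
    rw [pvSegMain f c0 periods_per_rotation ((periods_per_rotation - 1).toNat) 1 1 rfl]
    simp

-- ===== VERDICT (by name: the statement is the Claim_ definition above) =====
theorem create_period_block_names_spec : Claim_equal_create_period_block_names := by
  intro s pr cs _ _
  unfold Spec_create_period_block_names
  exact pvEq s pr cs
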